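-- pv_equiv track=rewrite | github.com/muhabal/TJT | receipt/tjtAdmin/excel.py | stripProductName
-- ===== SOURCE A (Python) =====
-- def stripProductName(name):
--   name_size = str(name).split(' ')
--   size = name_size[-1]
--   name_size.pop(-1)
--   name_only = ""
--   for item in name_size:
--     name_only += f" {item}"
--   return size, name_only.lstrip()
-- ===== SOURCE B (Python) =====
-- def stripProductName(name):
--   head, _, tail = str(name).rpartition(' ')
--   return tail, head.lstrip()
-- ===== Notes on version B (the rewrite author's own statement) =====
-- stated objective: simpler
-- what changed: B replaces A's split-into-all-tokens, pop the last element and rebuild-the-prefix-with-an-accumulation-loop by a single rpartition at the last space: the tail is the size and the lstripped head is the remaining name.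
import Mathlib
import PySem

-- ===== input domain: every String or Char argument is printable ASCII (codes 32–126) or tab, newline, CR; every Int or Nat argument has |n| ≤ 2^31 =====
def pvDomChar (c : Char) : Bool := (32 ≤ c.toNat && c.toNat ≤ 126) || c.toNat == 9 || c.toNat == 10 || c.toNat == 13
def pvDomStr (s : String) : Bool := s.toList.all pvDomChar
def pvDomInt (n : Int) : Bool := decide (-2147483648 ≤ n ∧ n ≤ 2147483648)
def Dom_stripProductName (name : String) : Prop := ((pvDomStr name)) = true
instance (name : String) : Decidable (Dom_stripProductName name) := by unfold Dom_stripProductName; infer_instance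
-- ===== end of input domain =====

set_option maxRecDepth 8192

-- B replaces A's split-into-all-tokens / pop / rebuild-with-a-loop by a single right-partition
-- at the last space (objective: simpler).


-- ===== PORT A =====
-- Literal port of A: split on ' ', take last element, pop it, rebuild the rest with a loop, lstrip.
-- The fallback arms are unreachable: split? with the nonempty separator " " is always `some`,
-- and Python's split always returns a nonempty list, so [-1] / pop(-1) never raise.
def stripProductName (name : String) : String × String :=
  match PySem.Str.split? name " " with
  | none => ("", "")
  | some name_size =>
    match PySem.List.pyGet? name_size (-1), PySem.List.pop? name_size (-1) with
    | some size, some (_, rest) =>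
      let name_only := rest.foldl (fun acc item => acc ++ " " ++ item) ""
      (size, PySem.Str.lstrip name_only)
    | _, _ => ("", "")

-- ===== PORT B =====
-- Hand port of str.rpartition(' ') (PySem has no rpartition): split the character list at the
-- LAST space; `none` means no space occurs. Exact: rpartition returns (before, ' ', after) or
-- ('', '', s) when the separator is absent.
def rpartSp : List Char → Option (List Char × List Char)
  | [] => none
  | c :: rest =>
    match rpartSp rest with
    | some (h, t) => some (c :: h, t)
    | none => if c = ' ' then some ([], rest) else none

def stripProductName_alt (name : String) : String × String :=
  match rpartSp name.toList with
  | some (h, t) => (String.ofList t, PySem.Str.lstrip (String.ofList h))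
  | none => (name, "")

-- ===== PRECONDITION & SPEC =====
def Spec_stripProductName (name : String) (out : String × String) : Prop := out = stripProductName_alt name
instance (name : String) (out : String × String) : Decidable (Spec_stripProductName name out) := by unfold Spec_stripProductName; infer_instance

-- ===== CLAIM (what is proved, stated in full; the proofs are below) =====
def Claim_equal_stripProductName : Prop := ∀ (name : String), Dom_stripProductName name → Spec_stripProductName name (stripProductName name)

-- ===== LEMMAS AND PROOFS =====

-- Simple accumulator-free form of Python's split(' ') on character lists.
def splitSp (cur : List Char) : List Char → List (List Char)
  | [] => [cur.reverse]
  | c :: rest => if c = ' ' then cur.reverse :: splitSp [] rest else splitSp (c :: cur) rest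

lemma splitSp_cons_space (cur rest : List Char) :
    splitSp cur (' ' :: rest) = cur.reverse :: splitSp [] rest := by
  simp [splitSp]

lemma splitSp_cons_of_ne {c : Char} (hc : c ≠ ' ') (cur rest : List Char) :
    splitSp cur (c :: rest) = splitSp (c :: cur) rest := by
  simp only [splitSp]; exact if_neg hc

lemma rpartSp_cons_space (rest : List Char) :
    rpartSp (' ' :: rest) =
      some (match rpartSp rest with | some (h, t) => (' ' :: h, t) | none => ([], rest)) := by
  simp only [rpartSp]
  rcases rpartSp rest with _ | ⟨h, t⟩
  · simp
  · rfl

lemma rpartSp_cons_of_ne {c : Char} (hc : c ≠ ' ') (rest : List Char) :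
    rpartSp (c :: rest) =
      match rpartSp rest with | some (h, t) => some (c :: h, t) | none => none := by
  simp only [rpartSp]
  rcases rpartSp rest with _ | ⟨h, t⟩
  · exact if_neg hc
  · rfl

lemma getLast?_cons_ne {α : Type} (a : α) (l : List α) (h : l ≠ []) :
    (a :: l).getLast? = l.getLast? := by
  cases l with
  | nil => exact absurd rfl h
  | cons b m => simp [List.getLast?_cons_cons]

lemma dropLast_cons_ne {α : Type} (a : α) (l : List α) (h : l ≠ []) :
    (a :: l).dropLast = a :: l.dropLast := by
  cases l with
  | nil => exact absurd rfl h
  | cons b m => rfl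

lemma splitSp_ne_nil (cur cs : List Char) : splitSp cur cs ≠ [] := by
  induction cs generalizing cur with
  | nil => simp [splitSp]
  | cons c rest ih =>
    simp only [splitSp]
    split_ifs <;> simp [ih]

lemma splitOn_go_eq (fuel : Nat) :
    ∀ (l cur : List Char) (acc : List (List Char)), l.length ≤ fuel →
      PySem.Chars.splitOn.go [' '] fuel l cur acc = acc.reverse ++ splitSp cur l := by
  induction fuel with
  | zero =>
    intro l cur acc h
    have : l = [] := by cases l <;> simp_all
    subst this
    simp [PySem.Chars.splitOn.go, splitSp]
  | succ f ih =>
    intro l cur acc h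
    cases l with
    | nil => simp [PySem.Chars.splitOn.go, splitSp]
    | cons c rest =>
      simp only [PySem.Chars.splitOn.go]
      by_cases hc : c = ' '
      · subst hc
        have hp : [' '].isPrefixOf (' ' :: rest) = true := by simp [List.isPrefixOf]
        rw [if_pos hp]
        simp only [List.length_cons] at h
        simp only [List.length_cons, List.length_nil, List.drop_succ_cons, List.drop_zero]
        rw [ih rest [] (cur.reverse :: acc) (by omega), splitSp_cons_space]
        simp only [List.reverse_cons, List.append_assoc, List.singleton_append]
      · have hp : [' '].isPrefixOf (c :: rest) = false := by
          simp only [List.isPrefixOf, Bool.and_eq_false_iff]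
          left
          exact beq_eq_false_iff_ne.mpr (fun h => hc h.symm)
        rw [if_neg (ne_true_of_eq_false hp)]
        simp only [List.length_cons] at h
        rw [ih rest (c :: cur) acc (by omega), splitSp_cons_of_ne hc]

lemma splitOn_eq_splitSp (cs : List Char) :
    PySem.Chars.splitOn cs [' '] = splitSp [] cs := by
  have := splitOn_go_eq (cs.length + 1) cs [] [] (by omega)
  simpa [PySem.Chars.splitOn] using this

-- the joint characterisation of A's pipeline vs rpartition
lemma key (cs : List Char) : ∀ cur : List Char,
    (splitSp cur cs).getLast? =
      some (match rpartSp cs with | none => cur.reverse ++ cs | some (_, t) => t)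
    ∧ (splitSp cur cs).dropLast.flatMap (fun it => ' ' :: it) =
      (match rpartSp cs with | none => [] | some (h, _) => ' ' :: (cur.reverse ++ h)) := by
  induction cs with
  | nil =>
    intro cur
    rw [show splitSp cur [] = [cur.reverse] from rfl,
        show rpartSp [] = none from rfl]
    simp
  | cons c rest ih =>
    intro cur
    by_cases hc : c = ' '
    · subst hc
      rw [splitSp_cons_space, rpartSp_cons_space]
      rcases h1 : rpartSp rest with _ | ⟨h, t⟩
      · -- no space in rest: splitSp [] rest is the singleton [rest]
        obtain ⟨hl, hd⟩ := ih []
        rw [h1] at hl hd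
        simp only at hl hd
        have hne := splitSp_ne_nil [] rest
        have hdl : (splitSp ([] : List Char) rest).dropLast = [] := by
          cases hdp : (splitSp ([] : List Char) rest).dropLast with
          | nil => rfl
          | cons a l => rw [hdp] at hd; simp at hd
        have hlast : (splitSp ([] : List Char) rest).getLast hne = rest := by
          have e := List.getLast?_eq_some_getLast (l := splitSp ([] : List Char) rest) hne
          rw [e] at hl; simpa using Option.some_injective _ hl
        have hsingle : splitSp ([] : List Char) rest = [rest] := by
          have hconc := List.dropLast_concat_getLast hne
          rw [hdl, hlast] at hconc
          simpa using hconc.symm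
        simp [hsingle]
      · obtain ⟨hl, hd⟩ := ih []
        rw [h1] at hl hd
        simp only at hl hd
        have hne := splitSp_ne_nil [] rest
        refine ⟨?_, ?_⟩
        · rw [getLast?_cons_ne _ _ hne, hl]
        · rw [dropLast_cons_ne _ _ hne]
          simp [hd]
    · rw [splitSp_cons_of_ne hc, rpartSp_cons_of_ne hc]
      rcases h1 : rpartSp rest with _ | ⟨h, t⟩
      · obtain ⟨hl, hd⟩ := ih (c :: cur)
        rw [h1] at hl hd
        simp only at hl hd
        refine ⟨?_, ?_⟩
        · rw [hl]; simp
        · rw [hd]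
      · obtain ⟨hl, hd⟩ := ih (c :: cur)
        rw [h1] at hl hd
        simp only at hl hd
        refine ⟨?_, ?_⟩
        · rw [hl]
        · rw [hd]; simp

lemma pyGet?_neg_one {α : Type} (l : List α) (h : l ≠ []) :
    PySem.List.pyGet? l (-1) = l.getLast? := by
  have hn : 1 ≤ l.length := List.length_pos_of_ne_nil h
  have h2 : -(l.length : Int) ≤ -1 := by omega
  simp [PySem.List.pyGet?, PySem.List.pyIdx?, h2, List.getLast?_eq_getElem?]

lemma pop?_neg_one {α : Type} (l : List α) (h : l ≠ []) :
    PySem.List.pop? l (-1) = l.getLast?.map (fun x => (x, l.dropLast)) := by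
  have hn : 1 ≤ l.length := List.length_pos_of_ne_nil h
  have h2 : -(l.length : Int) ≤ -1 := by omega
  simp only [PySem.List.pop?, PySem.List.pyIdx?]
  norm_num [h2]
  rw [List.getLast?_eq_getElem?]

lemma fold_toList (l : List String) (a : String) :
    (l.foldl (fun acc it => acc ++ " " ++ it) a).toList
      = a.toList ++ (l.map String.toList).flatMap (fun it => ' ' :: it) := by
  induction l generalizing a with
  | nil => simp
  | cons x xs ih =>
    rw [List.foldl_cons, ih]
    have : (a ++ " " ++ x).toList = a.toList ++ ' ' :: x.toList := by
      rw [String.toList_append, String.toList_append]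
      simp [show (" " : String).toList = [' '] from by decide]
    simp [this]

-- ===== VERDICT (by name: the statement is the Claim_ definition above) =====
theorem stripProductName_spec : Claim_equal_stripProductName := by
  intro name _
  unfold Spec_stripProductName stripProductName stripProductName_alt
  have hbridge := PySem.Str.split?_map name " "
  rw [show (" " : String).toList = [' '] from by decide] at hbridge
  rw [show PySem.Chars.split? name.toList [' ']
        = some (PySem.Chars.splitOn name.toList [' ']) from rfl,
      splitOn_eq_splitSp] at hbridge
  cases hsp : PySem.Str.split? name " " with
  | none => rw [hsp] at hbridge; simp at hbridge
  | some parts =>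
    rw [hsp] at hbridge
    simp only [Option.map_some, Option.some.injEq] at hbridge
    have hpne : parts ≠ [] := by
      intro hnil
      rw [hnil] at hbridge
      exact splitSp_ne_nil [] name.toList hbridge.symm
    obtain ⟨hlastKey, hdropKey⟩ := key name.toList []
    rw [← hbridge] at hlastKey hdropKey
    rw [List.getLast?_map] at hlastKey
    rw [← List.map_dropLast] at hdropKey
    obtain ⟨sz, hsz, hszval⟩ := Option.map_eq_some_iff.mp hlastKey
    dsimp only
    rw [pyGet?_neg_one parts hpne, hsz, pop?_neg_one parts hpne, hsz]
    simp only [Option.map_some]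
    have hno : ((parts.dropLast.foldl (fun acc it => acc ++ " " ++ it) "").toList)
        = (parts.dropLast.map String.toList).flatMap (fun it => ' ' :: it) := by
      rw [fold_toList]; simp
    rcases hr : rpartSp name.toList with _ | ⟨h, t⟩
    · simp only [hr] at hszval hdropKey ⊢
      refine Prod.ext ?_ ?_
      · exact String.toList_inj.mp (by rw [hszval]; simp)
      · apply String.toList_inj.mp
        rw [PySem.Str.toList_lstrip, hno, hdropKey]
        rfl
    · simp only [hr] at hszval hdropKey ⊢
      simp only [List.reverse_nil, List.nil_append] at hszval hdropKey
      refine Prod.ext ?_ ?_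
      · apply String.toList_inj.mp
        rw [hszval]; simp
      · apply String.toList_inj.mp
        rw [PySem.Str.toList_lstrip, PySem.Str.toList_lstrip, hno, hdropKey,
            show PySem.Chars.lstrip (' ' :: h) = PySem.Chars.lstrip h from rfl]
        simp
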